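-- pv_equiv track=rewrite | github.com/aradtamako/DNF_Calculator_R | calculate/terminal.py | divide_case
-- ===== SOURCE A (Python) =====
-- def divide_case(equipment_list, core_num):
--     divide_list = []
--     for i in range(0, core_num):
--         temp_list = [equipment_list[x] for x in range(len(equipment_list)) if x % core_num == i]
--         if temp_list == [[]] or temp_list == []:
--             continue
--         divide_list.append(temp_list)
--     return divide_list
-- ===== SOURCE B (Python) =====
-- def divide_case(equipment_list, core_num):
--     buckets = {}
--     for x, equipment in enumerate(equipment_list):
--         buckets.setdefault(x % core_num, []).append(equipment)
--     return [b for b in buckets.values() if b != [[]]]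
-- ===== Notes on version B (the rewrite author's own statement) =====
-- stated objective: faster
-- what changed: Instead of scanning the whole list once per bucket index (core_num full passes with a modulo test each), B makes a single pass over the list, distributing each element into a dict bucket keyed by index % core_num, then filters the bucket values.
-- outside the precondition, e.g. on divide_case([[1]], 0): A returns [], B raises ZeroDivisionError; on divide_case([[1]], -1): A returns [], B returns [[[1]]]
import Mathlib
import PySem

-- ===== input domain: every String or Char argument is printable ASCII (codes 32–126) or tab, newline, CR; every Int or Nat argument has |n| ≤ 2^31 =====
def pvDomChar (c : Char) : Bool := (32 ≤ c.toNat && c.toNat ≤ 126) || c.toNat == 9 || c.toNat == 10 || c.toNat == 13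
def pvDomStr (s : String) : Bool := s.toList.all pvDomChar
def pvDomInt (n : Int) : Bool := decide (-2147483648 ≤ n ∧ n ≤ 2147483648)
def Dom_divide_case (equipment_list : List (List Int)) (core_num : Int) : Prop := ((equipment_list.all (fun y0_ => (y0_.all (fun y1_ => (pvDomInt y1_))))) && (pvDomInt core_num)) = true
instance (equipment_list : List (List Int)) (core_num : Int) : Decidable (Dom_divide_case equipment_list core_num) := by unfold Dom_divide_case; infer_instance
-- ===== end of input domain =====

-- B replaces A's per-bucket rescans (one full pass per index i < core_num) by a single pass
-- distributing each element into a dict bucket keyed by index % core_num, then filtering the values.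


-- ===== PORT A =====
def divide_case (equipment_list : List (List Int)) (core_num : Int) : List (List (List Int)) :=
  (PySem.List.pyRange 0 core_num 1).foldl
    (fun divide_list i =>
      let temp_list :=
        ((PySem.List.pyRange 0 (PySem.List.len equipment_list) 1).filter
            (fun x => PySem.Int.mod x core_num == i)).map
          (fun x => PySem.List.pyGetD equipment_list x [])
      if temp_list = [[]] ∨ temp_list = [] then divide_list
      else divide_list ++ [temp_list])
    []

-- ===== PORT B =====
def divide_case_alt (equipment_list : List (List Int)) (core_num : Int) : List (List (List Int)) :=
  let buckets :=
    (PySem.List.enumerate equipment_list 0).foldl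
      (fun buckets p => buckets.modify (PySem.Int.mod p.1 core_num) [] (· ++ [p.2]))
      PySem.Dict.empty
  (PySem.Dict.values buckets).filter (fun b => !(b == [[]]))

-- ===== PRECONDITION & SPEC =====
-- Pre_ restricts to the natural domain: a positive number of cores. For core_num ≤ 0 A returns []
-- only because its range is empty, while B's modulo distribution raises (core_num = 0) or buckets
-- everything (core_num < 0); those counts are outside the function's purpose.
def Pre_divide_case (equipment_list : List (List Int)) (core_num : Int) : Prop := 1 ≤ core_num
instance (equipment_list : List (List Int)) (core_num : Int) : Decidable (Pre_divide_case equipment_list core_num) := by unfold Pre_divide_case; infer_instance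
def pvWitness_divide_case : List (List Int) × Int := ([[1], [2, 3], [], [4]], 2)

def Spec_divide_case (equipment_list : List (List Int)) (core_num : Int) (out : List (List (List Int))) : Prop := out = divide_case_alt equipment_list core_num
instance (equipment_list : List (List Int)) (core_num : Int) (out : List (List (List Int))) : Decidable (Spec_divide_case equipment_list core_num out) := by unfold Spec_divide_case; infer_instance

-- ===== CLAIM (what is proved, stated in full; the proofs are below) =====
def Claim_equal_divide_case : Prop := ∀ (equipment_list : List (List Int)) (core_num : Int), Dom_divide_case equipment_list core_num → Pre_divide_case equipment_list core_num → Spec_divide_case equipment_list core_num (divide_case equipment_list core_num)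


-- ===== LEMMAS AND PROOFS =====

-- Python % with a positive divisor, on a small nonnegative argument.
lemma pv_mod_small {x c : Int} (h0 : 0 ≤ x) (h : x < c) : PySem.Int.mod x c = x := by
  rw [PySem.Int.mod_eq_emod_of_pos (by omega)]
  exact Int.emod_eq_of_lt h0 h

-- A's bucket for index i, exactly A's comprehension.
def pvTemp (equipment_list : List (List Int)) (core_num i : Int) : List (List Int) :=
  ((PySem.List.pyRange 0 (PySem.List.len equipment_list) 1).filter
      (fun x => PySem.Int.mod x core_num == i)).map
    (fun x => PySem.List.pyGetD equipment_list x [])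

-- A is the filtered-then-mapped list of its per-index buckets.
lemma divide_case_eq_filter_map (equipment_list : List (List Int)) (core_num : Int) :
    divide_case equipment_list core_num =
      ((PySem.List.pyRange 0 core_num 1).filter
          (fun i => !(pvTemp equipment_list core_num i == [[]] || pvTemp equipment_list core_num i == []))).map
        (pvTemp equipment_list core_num) := by
  unfold divide_case
  have hfun : (fun (divide_list : List (List (List Int))) (i : Int) =>
      let temp_list :=
        ((PySem.List.pyRange 0 (PySem.List.len equipment_list) 1).filter
            (fun x => PySem.Int.mod x core_num == i)).map
          (fun x => PySem.List.pyGetD equipment_list x [])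
      if temp_list = [[]] ∨ temp_list = [] then divide_list
      else divide_list ++ [temp_list]) =
      (fun divide_list i =>
        if (!(pvTemp equipment_list core_num i == [[]] || pvTemp equipment_list core_num i == [])) = true
        then divide_list ++ [pvTemp equipment_list core_num i] else divide_list) := by
    funext divide_list i
    show (if pvTemp equipment_list core_num i = [[]] ∨ pvTemp equipment_list core_num i = [] then divide_list
          else divide_list ++ [pvTemp equipment_list core_num i]) = _
    by_cases h1 : pvTemp equipment_list core_num i = [[]] <;>
      by_cases h2 : pvTemp equipment_list core_num i = [] <;> simp [h1, h2]
  rw [hfun, PySem.List.foldl_append_if]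
  simp

-- B's bucket content: the dict bucket at key i is exactly A's comprehension for i.
lemma bucket_eq (equipment_list : List (List Int)) (core_num i : Int) :
    ((PySem.List.enumerate equipment_list 0).foldl
        (fun buckets p => buckets.modify (PySem.Int.mod p.1 core_num) [] (· ++ [p.2]))
        PySem.Dict.empty).getD i [] = pvTemp equipment_list core_num i := by
  have h : (PySem.List.enumerate equipment_list 0).foldl
        (fun buckets p => buckets.modify (PySem.Int.mod p.1 core_num) [] (· ++ [p.2]))
        PySem.Dict.empty
      = (((PySem.List.enumerate equipment_list 0).map
            (fun p => (PySem.Int.mod p.1 core_num, p.2))).foldl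
          (fun buckets p => buckets.modify p.1 [] (· ++ [p.2])) PySem.Dict.empty) := by
    rw [List.foldl_map]
  rw [h, PySem.Dict.getD_foldl_modify_append]
  rw [PySem.List.enumerate_eq_map_pyRange equipment_list ([] : List Int)]
  simp [List.filter_map, List.map_map, pvTemp, Function.comp_def]

-- The dict's keys, in insertion order, are 0, 1, ..., min(len, core_num) - 1.
lemma keys_eq (equipment_list : List (List Int)) (core_num : Int) (h : 1 ≤ core_num) :
    ((PySem.List.enumerate equipment_list 0).foldl
        (fun buckets p => buckets.modify (PySem.Int.mod p.1 core_num) [] (· ++ [p.2]))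
        PySem.Dict.empty).keys =
      PySem.List.pyRange 0 (min (equipment_list.length : Int) core_num) 1 := by
  rw [PySem.Dict.keys_foldl_modify_key (PySem.List.enumerate equipment_list 0)
      (fun p => PySem.Int.mod p.1 core_num) [] (fun _ p => (· ++ [p.2])) PySem.Dict.empty]
  rw [PySem.Dict.keys_empty, PySem.Set.update_nil_left]
  have hmap : (PySem.List.enumerate equipment_list 0).map (fun p => PySem.Int.mod p.1 core_num)
      = (PySem.List.pyRange 0 (equipment_list.length : Int) 1).map (fun x => PySem.Int.mod x core_num) := by
    rw [show (fun p : Int × List Int => PySem.Int.mod p.1 core_num)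
        = (fun x => PySem.Int.mod x core_num) ∘ (fun p : Int × List Int => p.1) from rfl]
    rw [← List.map_map, PySem.List.map_fst_enumerate]
    norm_num
  rw [hmap]
  have h0m : 0 ≤ min (equipment_list.length : Int) core_num := by omega
  have hmn : min (equipment_list.length : Int) core_num ≤ (equipment_list.length : Int) := by omega
  rw [PySem.List.pyRange_one_append 0 (min (equipment_list.length : Int) core_num)
      (equipment_list.length : Int) h0m hmn, List.map_append]
  have hid : (PySem.List.pyRange 0 (min (equipment_list.length : Int) core_num) 1).map
      (fun x => PySem.Int.mod x core_num) = PySem.List.pyRange 0 (min (equipment_list.length : Int) core_num) 1 := by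
    conv_rhs => rw [← List.map_id (PySem.List.pyRange 0 (min (equipment_list.length : Int) core_num) 1)]
    apply List.map_congr_left
    intro x hx
    rw [PySem.List.mem_pyRange_one] at hx
    exact pv_mod_small hx.1 (by omega)
  rw [hid, PySem.Set.ofList_append,
      PySem.Set.ofList_eq_self_of_nodup _ (PySem.List.nodup_pyRange_one _ _),
      PySem.Set.update_eq_append_filter]
  have hnil : (PySem.Set.ofList ((PySem.List.pyRange (min (equipment_list.length : Int) core_num)
        (equipment_list.length : Int) 1).map (fun x => PySem.Int.mod x core_num))).filter
      (fun y => !(PySem.Set.contains (PySem.List.pyRange 0 (min (equipment_list.length : Int) core_num) 1) y))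
      = [] := by
    rw [List.filter_eq_nil_iff]
    intro y hy
    rw [PySem.Set.mem_ofList, List.mem_map] at hy
    obtain ⟨x, hx, rfl⟩ := hy
    rw [PySem.List.mem_pyRange_one] at hx
    simp only [Bool.not_eq_true', Bool.not_eq_false]
    rw [PySem.Set.contains_iff, PySem.List.mem_pyRange_one]
    refine ⟨PySem.Int.mod_nonneg x (by omega), ?_⟩
    have := PySem.Int.mod_lt x (b := core_num) (by omega)
    omega
  rw [hnil]
  simp

-- Buckets at indices below min(len, core_num) are nonempty.
lemma temp_ne_nil (equipment_list : List (List Int)) (core_num i : Int)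
    (h0 : 0 ≤ i) (h : i < min (equipment_list.length : Int) core_num) :
    pvTemp equipment_list core_num i ≠ [] := by
  have hi : i ∈ (PySem.List.pyRange 0 (PySem.List.len equipment_list) 1).filter
      (fun x => PySem.Int.mod x core_num == i) := by
    rw [List.mem_filter]
    refine ⟨?_, ?_⟩
    · rw [PySem.List.mem_pyRange_one, PySem.List.len_eq]
      omega
    · show (PySem.Int.mod i core_num == i) = true
      rw [pv_mod_small h0 (by omega)]
      simp
  exact List.ne_nil_of_mem (List.mem_map_of_mem hi)

-- Buckets at indices at or above min(len, core_num) are empty.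
lemma temp_eq_nil (equipment_list : List (List Int)) (core_num i : Int)
    (hm : min (equipment_list.length : Int) core_num ≤ i) (hi : i < core_num) :
    pvTemp equipment_list core_num i = [] := by
  unfold pvTemp
  rw [List.map_eq_nil_iff, List.filter_eq_nil_iff]
  intro x hx
  rw [PySem.List.mem_pyRange_one, PySem.List.len_eq] at hx
  rw [pv_mod_small hx.1 (by omega)]
  simp
  omega

-- ===== VERDICT (by name: the statement is the Claim_ definition above) =====
theorem divide_case_spec : Claim_equal_divide_case := by
  intro equipment_list core_num _ hpre
  unfold Pre_divide_case at hpre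
  unfold Spec_divide_case divide_case_alt
  show divide_case equipment_list core_num
      = ((((PySem.List.enumerate equipment_list 0).foldl
            (fun buckets p => buckets.modify (PySem.Int.mod p.1 core_num) [] (· ++ [p.2]))
            PySem.Dict.empty).values).filter (fun b => !(b == [[]])))
  have hnd : (((PySem.List.enumerate equipment_list 0).foldl
        (fun buckets p => buckets.modify (PySem.Int.mod p.1 core_num) [] (· ++ [p.2]))
        PySem.Dict.empty)).keys.Nodup :=
    PySem.Dict.nodup_keys_foldl_modify_key _ _ _ _ _ PySem.Dict.nodup_keys_empty
  rw [PySem.Dict.values_eq_map_keys _ hnd ([] : List (List Int)),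
      keys_eq equipment_list core_num hpre,
      List.filter_map,
      show (fun k => (((PySem.List.enumerate equipment_list 0).foldl
            (fun buckets p => buckets.modify (PySem.Int.mod p.1 core_num) [] (· ++ [p.2]))
            PySem.Dict.empty)).getD k []) = pvTemp equipment_list core_num
        from funext (bucket_eq equipment_list core_num)]
  rw [divide_case_eq_filter_map]
  have h0m : (0 : Int) ≤ min (equipment_list.length : Int) core_num := by omega
  have hmc : min (equipment_list.length : Int) core_num ≤ core_num := by omega
  rw [PySem.List.pyRange_one_append 0 (min (equipment_list.length : Int) core_num) core_num h0m hmc,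
      List.filter_append]
  have h2 : (PySem.List.pyRange (min (equipment_list.length : Int) core_num) core_num 1).filter
      (fun i => !(pvTemp equipment_list core_num i == [[]] || pvTemp equipment_list core_num i == []))
      = [] := by
    rw [List.filter_eq_nil_iff]
    intro i hi
    rw [PySem.List.mem_pyRange_one] at hi
    simp [temp_eq_nil equipment_list core_num i hi.1 hi.2]
  rw [h2, List.append_nil]
  have h3 : (PySem.List.pyRange 0 (min (equipment_list.length : Int) core_num) 1).filter
      (fun i => !(pvTemp equipment_list core_num i == [[]] || pvTemp equipment_list core_num i == []))
      = (PySem.List.pyRange 0 (min (equipment_list.length : Int) core_num) 1).filter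
        ((fun b => !(b == [[]])) ∘ pvTemp equipment_list core_num) := by
    apply List.filter_congr
    intro i hi
    rw [PySem.List.mem_pyRange_one] at hi
    have hne : (pvTemp equipment_list core_num i == ([] : List (List Int))) = false :=
      beq_eq_false_iff_ne.mpr (temp_ne_nil equipment_list core_num i hi.1 hi.2)
    simp [hne, Function.comp]
  rw [h3]
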